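-- pv_equiv track=rewrite | github.com/JBELE4/algorimos-codigos | juez/juez5/SANDI.py | cortar
-- ===== SOURCE A (Python) =====
-- def cortar(sandia,c ,xinicio,xfin,yinicio,yfin):
--     xmedio=(xinicio+xfin)//2
--     ymedio=(yinicio+yfin)//2
--     contador=0
--     if c==0:
--         for i in range(xinicio,xfin):
--             for z in range(yinicio,yfin):
--                 contador+=sandia[i][z]
--         return contador
--     else:
--         return min(cortar(sandia,c-1,xinicio,xmedio,yinicio,ymedio),cortar(sandia,c-1,xinicio,xmedio,ymedio,yfin),cortar(sandia,c-1,xmedio,xfin,yinicio,ymedio),cortar(sandia,c-1,xmedio,xfin,ymedio,yfin))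
-- ===== SOURCE B (Python) =====
-- def _cuadrantes(r):
--     x0, x1, y0, y1 = r
--     xm = (x0 + x1) // 2
--     ym = (y0 + y1) // 2
--     return [(x0, xm, y0, ym), (x0, xm, ym, y1), (xm, x1, y0, ym), (xm, x1, ym, y1)]
--
--
-- def cortar(sandia, c, xinicio, xfin, yinicio, yfin):
--     rowpref = []
--     for row in sandia:
--         p = [0]
--         s = 0
--         for v in row:
--             s += v
--             p.append(s)
--         rowpref.append(p)
--     rects = [(xinicio, xfin, yinicio, yfin)]
--     for _ in range(c):
--         rects = [q for r in rects for q in _cuadrantes(r)]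
--     sums = []
--     for (x0, x1, y0, y1) in rects:
--         if x1 <= x0 or y1 <= y0:
--             sums.append(0)
--         else:
--             t = 0
--             for i in range(x0, x1):
--                 t += rowpref[i][y1] - rowpref[i][y0]
--             sums.append(t)
--     return min(sums)
-- ===== Notes on version B (the rewrite author's own statement) =====
-- stated objective: alternative
-- what changed: B replaces A's recursion entirely: it builds per-row prefix sums once, then iteratively expands a worklist of rectangles level by level (c rounds of quadrant splitting with the same midpoints) and finally returns the min of the leaf sums, each computed as prefix-sum differences instead of A's nested element loops.
-- outside the precondition, e.g. on cortar([[1, 2, 3]], 0, 0, 1, -1, 1): A returns 4, B returns -5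
import Mathlib
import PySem

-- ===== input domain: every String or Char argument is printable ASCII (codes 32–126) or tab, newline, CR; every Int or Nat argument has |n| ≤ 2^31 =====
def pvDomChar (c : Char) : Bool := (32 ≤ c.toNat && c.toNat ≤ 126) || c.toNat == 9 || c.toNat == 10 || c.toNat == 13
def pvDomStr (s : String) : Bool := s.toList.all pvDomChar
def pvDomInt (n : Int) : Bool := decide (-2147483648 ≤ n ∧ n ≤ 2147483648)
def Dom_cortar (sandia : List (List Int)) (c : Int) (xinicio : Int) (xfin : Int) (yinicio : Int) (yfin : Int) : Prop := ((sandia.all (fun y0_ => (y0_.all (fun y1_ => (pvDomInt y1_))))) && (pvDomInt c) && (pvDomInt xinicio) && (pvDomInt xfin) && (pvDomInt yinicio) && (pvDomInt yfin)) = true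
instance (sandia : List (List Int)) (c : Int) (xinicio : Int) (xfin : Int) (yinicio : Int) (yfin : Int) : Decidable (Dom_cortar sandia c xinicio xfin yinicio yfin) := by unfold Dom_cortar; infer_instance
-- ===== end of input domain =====

-- B replaces A's recursion by an iterative level-by-level worklist of rectangles (same midpoints)
-- plus per-row prefix sums, taking the min over the leaf sums at the end; same cost, different structure.

-- ===== PORT A =====
-- recursion of A on fuel = c.toNat (Python recurses on c-1 until c == 0; Pre_ requires 0 ≤ c)
def cortarA (sandia : List (List Int)) : Nat → Int → Int → Int → Int → Int
  | 0, x0, x1, y0, y1 =>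
      (PySem.List.pyRange x0 x1 1).foldl
        (fun acc i =>
          (PySem.List.pyRange y0 y1 1).foldl
            (fun acc2 z => acc2 + PySem.List.pyGetD (PySem.List.pyGetD sandia i []) z 0) acc) 0
  | n+1, x0, x1, y0, y1 =>
      min (min (min (cortarA sandia n x0 (PySem.Int.floordiv (x0 + x1) 2) y0 (PySem.Int.floordiv (y0 + y1) 2))
                    (cortarA sandia n x0 (PySem.Int.floordiv (x0 + x1) 2) (PySem.Int.floordiv (y0 + y1) 2) y1))
               (cortarA sandia n (PySem.Int.floordiv (x0 + x1) 2) x1 y0 (PySem.Int.floordiv (y0 + y1) 2)))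
          (cortarA sandia n (PySem.Int.floordiv (x0 + x1) 2) x1 (PySem.Int.floordiv (y0 + y1) 2) y1)

def cortar (sandia : List (List Int)) (c : Int) (xinicio : Int) (xfin : Int) (yinicio : Int) (yfin : Int) : Int :=
  cortarA sandia c.toNat xinicio xfin yinicio yfin

-- ===== PORT B =====
-- per-row prefix sums: p = [0]; s = 0; for v in row: s += v; p.append(s)
def pvRowPref (row : List Int) : List Int :=
  (row.foldl (fun (st : List Int × Int) v => (st.1 ++ [st.2 + v], st.2 + v)) (([0] : List Int), (0 : Int))).1

-- the four quadrants a rectangle expands to (the body of B's inner worklist loop)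
def pvExpand : Int × Int × Int × Int → List (Int × Int × Int × Int)
  | (x0, x1, y0, y1) =>
      [(x0, PySem.Int.floordiv (x0 + x1) 2, y0, PySem.Int.floordiv (y0 + y1) 2),
       (x0, PySem.Int.floordiv (x0 + x1) 2, PySem.Int.floordiv (y0 + y1) 2, y1),
       (PySem.Int.floordiv (x0 + x1) 2, x1, y0, PySem.Int.floordiv (y0 + y1) 2),
       (PySem.Int.floordiv (x0 + x1) 2, x1, PySem.Int.floordiv (y0 + y1) 2, y1)]

-- one round of 'rects = [q for r in rects for q in cuadrantes(r)]'
def pvLevel (rects : List (Int × Int × Int × Int)) : List (Int × Int × Int × Int) :=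
  rects.flatMap pvExpand

-- 'for _ in range(c): rects = level(rects)'
def pvIter : Nat → List (Int × Int × Int × Int) → List (Int × Int × Int × Int)
  | 0, rects => rects
  | n + 1, rects => pvIter n (pvLevel rects)

-- leaf sum of one rectangle from the row prefix sums
def pvLeaf (rowpref : List (List Int)) : Int × Int × Int × Int → Int
  | (x0, x1, y0, y1) =>
      if x1 ≤ x0 ∨ y1 ≤ y0 then 0
      else
        (PySem.List.pyRange x0 x1 1).foldl
          (fun acc i =>
            acc + (PySem.List.pyGetD (PySem.List.pyGetD rowpref i []) y1 0
                   - PySem.List.pyGetD (PySem.List.pyGetD rowpref i []) y0 0)) 0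

-- Python's min(sums) on a nonempty list ([] never occurs; 0 is a dead default)
def pvMinList : List Int → Int
  | [] => 0
  | x :: xs => xs.foldl min x

def cortar_alt (sandia : List (List Int)) (c : Int) (xinicio : Int) (xfin : Int) (yinicio : Int) (yfin : Int) : Int :=
  let rowpref := sandia.foldl (fun acc row => acc ++ [pvRowPref row]) []
  pvMinList ((pvIter c.toNat [(xinicio, xfin, yinicio, yfin)]).map (pvLeaf rowpref))

-- ===== PRECONDITION & SPEC =====
-- Pre_ excludes: negative c, on which A recurses on c-1 forever and raises RecursionError; and
-- out-of-grid coordinates with a non-empty rectangle, where A either raises IndexError or, for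
-- negative start indices, returns a sum of wrapped-around elements that is an accident of Python's
-- negative indexing (a corner no caller would specify; B returns a different accidental
-- prefix-difference value there).
def Pre_cortar (sandia : List (List Int)) (c : Int) (xinicio : Int) (xfin : Int) (yinicio : Int) (yfin : Int) : Prop :=
  0 ≤ c ∧
  (xfin ≤ xinicio ∨ yfin ≤ yinicio ∨
    (0 ≤ xinicio ∧ xfin ≤ (sandia.length : Int) ∧ 0 ≤ yinicio ∧
      ∀ r ∈ (sandia.drop xinicio.toNat).take (xfin - xinicio).toNat, yfin ≤ (r.length : Int)))
instance (sandia : List (List Int)) (c : Int) (xinicio : Int) (xfin : Int) (yinicio : Int) (yfin : Int) : Decidable (Pre_cortar sandia c xinicio xfin yinicio yfin) := by unfold Pre_cortar; infer_instance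

def pvWitness_cortar : List (List Int) × Int × Int × Int × Int × Int := ([[1, 2], [3, 4]], 1, 0, 2, 0, 2)

def Spec_cortar (sandia : List (List Int)) (c : Int) (xinicio : Int) (xfin : Int) (yinicio : Int) (yfin : Int) (out : Int) : Prop := out = cortar_alt sandia c xinicio xfin yinicio yfin
instance (sandia : List (List Int)) (c : Int) (xinicio : Int) (xfin : Int) (yinicio : Int) (yfin : Int) (out : Int) : Decidable (Spec_cortar sandia c xinicio xfin yinicio yfin out) := by unfold Spec_cortar; infer_instance

-- ===== CLAIM (what is proved, stated in full; the proofs are below) =====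
def Claim_equal_cortar : Prop := ∀ (sandia : List (List Int)) (c : Int) (xinicio : Int) (xfin : Int) (yinicio : Int) (yfin : Int), Dom_cortar sandia c xinicio xfin yinicio yfin → Pre_cortar sandia c xinicio xfin yinicio yfin → Spec_cortar sandia c xinicio xfin yinicio yfin (cortar sandia c xinicio xfin yinicio yfin)

-- ===== LEMMAS AND PROOFS =====

-- the invariant the quadrant subdivision maintains
def pvInv (sandia : List (List Int)) (x0 x1 y0 y1 : Int) : Prop :=
  x1 ≤ x0 ∨ y1 ≤ y0 ∨
    (0 ≤ x0 ∧ x1 ≤ (sandia.length : Int) ∧ 0 ≤ y0 ∧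
      ∀ i : Int, x0 ≤ i → i < x1 → y1 ≤ ((PySem.List.pyGetD sandia i []).length : Int))

def pvInvR (sandia : List (List Int)) (r : Int × Int × Int × Int) : Prop :=
  pvInv sandia r.1 r.2.1 r.2.2.1 r.2.2.2

lemma pvRowPref_aux (l : List Int) (p : List Int) (s : Int) :
    (l.foldl (fun (st : List Int × Int) v => (st.1 ++ [st.2 + v], st.2 + v)) (p, s))
      = (p ++ (List.range l.length).map (fun j => s + (l.take (j+1)).sum), s + l.sum) := by
  induction l generalizing p s with
  | nil => simp
  | cons v l ih =>
      simp only [List.foldl_cons, ih, List.length_cons, List.range_succ_eq_map,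
        List.map_cons, List.map_map, List.sum_cons]
      rw [Prod.mk.injEq]
      constructor
      · simp [Function.comp_def, List.take_succ_cons, add_assoc, List.append_assoc]
      · ring

lemma pvRowPref_eq (row : List Int) :
    pvRowPref row = (List.range (row.length + 1)).map (fun j => (row.take j).sum) := by
  unfold pvRowPref
  rw [pvRowPref_aux]
  simp [List.range_succ_eq_map, List.map_map, Function.comp_def]

lemma pvRowPref_get (row : List Int) (j : Int) (h0 : 0 ≤ j) (h1 : j ≤ (row.length : Int)) (d : Int) :
    PySem.List.pyGetD (pvRowPref row) j d = (row.take j.toNat).sum := by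
  rw [pvRowPref_eq]
  rw [PySem.List.pyGetD_eq_getElem _ d h0 (by simp; omega)]
  simp

-- A's inner loop over a row, for a non-degenerate in-bounds column range
lemma pvInner (row : List Int) (y0 y1 a : Int) (h0 : 0 ≤ y0) (h01 : y0 ≤ y1) (h1 : y1 ≤ (row.length : Int)) :
    (PySem.List.pyRange y0 y1 1).foldl (fun acc2 z => acc2 + PySem.List.pyGetD row z 0) a
      = a + ((row.take y1.toNat).sum - (row.take y0.toNat).sum) := by
  have hlen : ((row.take y1.toNat).length : Int) = y1 := by
    simp only [List.length_take]
    omega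
  have step1 : ∀ (acc : Int), ∀ z ∈ PySem.List.pyRange y0 y1 1,
      acc + PySem.List.pyGetD row z 0 = acc + PySem.List.pyGetD (row.take y1.toNat) z 0 := by
    intro acc z hz
    rw [PySem.List.mem_pyRange_one] at hz
    have hz0 : (0:Int) ≤ z := by omega
    have hz1 : z < (row.length : Int) := by omega
    have hz2 : z < ((row.take y1.toNat).length : Int) := by omega
    rw [PySem.List.pyGetD_eq_getElem _ _ hz0 hz1, PySem.List.pyGetD_eq_getElem _ _ hz0 hz2,
        List.getElem_take]
  rw [PySem.List.foldl_congr_mem _ _ _ _ step1]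
  rw [show PySem.List.pyRange y0 y1 1 = PySem.List.pyRange y0 ((row.take y1.toNat).length : Int) 1 from by
        rw [hlen]]
  rw [PySem.List.foldl_pyRange_pyGetD' _ _ _ _ h0]
  rw [PySem.List.foldl_add _ (fun x => x) a]
  have hsum : (row.take y1.toNat).sum
      = (row.take y0.toNat).sum + ((row.take y1.toNat).drop y0.toNat).sum := by
    conv_lhs => rw [← List.take_append_drop y0.toNat (row.take y1.toNat)]
    rw [List.sum_append, List.take_take]
    have hmin : min y0.toNat y1.toNat = y0.toNat := by omega
    rw [hmin]
  simp only [List.map_id']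
  omega

lemma pvRowpref_list (sandia : List (List Int)) :
    (sandia.foldl (fun acc row => acc ++ [pvRowPref row]) []) = sandia.map pvRowPref := by
  simpa using PySem.List.foldl_append_singleton_eq_map pvRowPref sandia []

-- leaf agreement under the invariant: B's prefix-difference leaf equals A's c==0 double loop
lemma pvBase (sandia : List (List Int)) (x0 x1 y0 y1 : Int) (hinv : pvInv sandia x0 x1 y0 y1) :
    pvLeaf (sandia.map pvRowPref) (x0, x1, y0, y1) = cortarA sandia 0 x0 x1 y0 y1 := by
  by_cases hx : x1 ≤ x0
  · simp [cortarA, pvLeaf, PySem.List.pyRange_one_eq_nil hx, hx]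
  · by_cases hy : y1 ≤ y0
    · simp only [cortarA, pvLeaf, if_pos (Or.inr hy), PySem.List.pyRange_one_eq_nil hy,
        List.foldl_nil, List.foldl_fixed]
    · rcases hinv with h | h | ⟨hx0, hx1, hy0, hrows⟩
      · exact absurd h hx
      · exact absurd h hy
      · simp only [cortarA, pvLeaf, if_neg (show ¬(x1 ≤ x0 ∨ y1 ≤ y0) by omega)]
        refine (PySem.List.foldl_congr_mem _ _ _ _ (fun acc i hi => ?_)).symm
        rw [PySem.List.mem_pyRange_one] at hi
        have hilt : i.toNat < sandia.length := by omega
        have hrow : PySem.List.pyGetD sandia i [] = sandia[i.toNat]'hilt :=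
          PySem.List.pyGetD_eq_getElem _ _ (by omega) (by omega)
        have hlen : y1 ≤ ((sandia[i.toNat]'hilt).length : Int) := by
          have := hrows i hi.1 hi.2; rwa [hrow] at this
        have hprow : PySem.List.pyGetD (sandia.map pvRowPref) i []
            = pvRowPref (sandia[i.toNat]'hilt) := by
          rw [PySem.List.pyGetD_eq_getElem _ _ (by omega) (by simp; omega)]
          simp
        rw [hrow, pvInner _ y0 y1 acc hy0 (by omega) hlen, hprow,
            pvRowPref_get _ _ (by omega) hlen, pvRowPref_get _ _ hy0 (by omega)]

-- the invariant is preserved by each of the four quadrant subcalls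
lemma pvInv_quad (sandia : List (List Int)) (x0 x1 y0 y1 a0 a1 b0 b1 : Int)
    (hinv : pvInv sandia x0 x1 y0 y1)
    (hx : (a0 = x0 ∧ a1 = PySem.Int.floordiv (x0 + x1) 2) ∨ (a0 = PySem.Int.floordiv (x0 + x1) 2 ∧ a1 = x1))
    (hy : (b0 = y0 ∧ b1 = PySem.Int.floordiv (y0 + y1) 2) ∨ (b0 = PySem.Int.floordiv (y0 + y1) 2 ∧ b1 = y1)) :
    pvInv sandia a0 a1 b0 b1 := by
  have hxm : PySem.Int.floordiv (x0 + x1) 2 = (x0 + x1) / 2 :=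
    PySem.Int.floordiv_eq_ediv_of_pos (by omega)
  have hym : PySem.Int.floordiv (y0 + y1) 2 = (y0 + y1) / 2 :=
    PySem.Int.floordiv_eq_ediv_of_pos (by omega)
  rw [hxm] at hx; rw [hym] at hy
  rcases hinv with h | h | ⟨hx0, hx1, hy0, hrows⟩
  · left; omega
  · right; left; omega
  · by_cases hxe : x1 ≤ x0
    · left; omega
    · by_cases hye : y1 ≤ y0
      · right; left; omega
      · right; right
        refine ⟨by omega, by omega, by omega, fun i hi0 hi1 => ?_⟩
        have := hrows i (by omega) (by omega)
        omega

-- membership form: any member of an expansion keeps the invariant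
lemma pvInv_step (sandia : List (List Int)) (r q : Int × Int × Int × Int)
    (hinv : pvInvR sandia r) (hq : q ∈ pvExpand r) : pvInvR sandia q := by
  obtain ⟨x0, x1, y0, y1⟩ := r
  obtain ⟨a0, a1, b0, b1⟩ := q
  simp only [pvExpand, List.mem_cons, List.not_mem_nil, or_false, Prod.mk.injEq] at hq
  show pvInv sandia a0 a1 b0 b1
  have hinv' : pvInv sandia x0 x1 y0 y1 := hinv
  rcases hq with ⟨h1, h2, h3, h4⟩ | ⟨h1, h2, h3, h4⟩ | ⟨h1, h2, h3, h4⟩ | ⟨h1, h2, h3, h4⟩ <;>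
    exact pvInv_quad sandia x0 x1 y0 y1 a0 a1 b0 b1 hinv' (by tauto) (by tauto)

-- min-fold bookkeeping for the worklist
lemma pvFoldlMin (x : Int) (xs : List Int) : ∀ b : Int, (x :: xs).foldl min b = min b (pvMinList (x :: xs)) := by
  induction xs generalizing x with
  | nil => intro b; simp [pvMinList]
  | cons y ys ih =>
      intro b
      have h1 := ih y (min b x)
      have h2 := ih y x
      simp only [pvMinList] at *
      simp only [List.foldl_cons] at *
      rw [h1, h2]
      omega

lemma pvMinList_cons (x : Int) (xs : List Int) (h : xs ≠ []) :
    pvMinList (x :: xs) = min x (pvMinList xs) := by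
  obtain ⟨y, ys, rfl⟩ := List.exists_cons_of_ne_nil h
  exact pvFoldlMin y ys x

lemma pvMinList_append (l₁ l₂ : List Int) (h₁ : l₁ ≠ []) (h₂ : l₂ ≠ []) :
    pvMinList (l₁ ++ l₂) = min (pvMinList l₁) (pvMinList l₂) := by
  obtain ⟨x, xs, rfl⟩ := List.exists_cons_of_ne_nil h₁
  simp only [pvMinList, List.cons_append, List.foldl_append]
  obtain ⟨y, ys, rfl⟩ := List.exists_cons_of_ne_nil h₂
  rw [pvFoldlMin y ys]
  simp [pvMinList]

lemma pvLevel_eq_flatMap (rects : List (Int × Int × Int × Int)) :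
    pvLevel rects = rects.flatMap pvExpand := rfl

-- min over an expanded level = min of per-rectangle mins
lemma pvMin_flatMap (f : Int × Int × Int × Int → Int) (rects : List (Int × Int × Int × Int)) :
    pvMinList ((rects.flatMap pvExpand).map f)
      = pvMinList (rects.map (fun q => pvMinList ((pvExpand q).map f))) := by
  induction rects with
  | nil => simp
  | cons r rs ih =>
      have e1 : ((r :: rs).flatMap pvExpand).map f
          = (pvExpand r).map f ++ (rs.flatMap pvExpand).map f := by simp
      rw [e1]
      cases rs with
      | nil => simp [pvMinList]
      | cons r' rs' =>
          have h₁ : (pvExpand r).map f ≠ [] := by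
            obtain ⟨a, b, c, d⟩ := r; simp [pvExpand]
          have h₂ : ((r' :: rs').flatMap pvExpand).map f ≠ [] := by
            obtain ⟨a, b, c, d⟩ := r'; simp [pvExpand]
          have hg : pvMinList ((r :: r' :: rs').map (fun q => pvMinList ((pvExpand q).map f)))
              = min (pvMinList ((pvExpand r).map f))
                  (pvMinList ((r' :: rs').map (fun q => pvMinList ((pvExpand q).map f)))) := by
            rw [List.map_cons, pvMinList_cons _ _ (by simp)]
          rw [hg, pvMinList_append _ _ h₁ h₂, ih]

-- min over the four quadrants of one rectangle = A's recursive step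
lemma pvMin_expand (sandia : List (List Int)) (n : Nat) (q : Int × Int × Int × Int) :
    pvMinList ((pvExpand q).map (fun r => cortarA sandia n r.1 r.2.1 r.2.2.1 r.2.2.2))
      = cortarA sandia (n + 1) q.1 q.2.1 q.2.2.1 q.2.2.2 := by
  obtain ⟨x0, x1, y0, y1⟩ := q
  simp only [pvExpand, List.map_cons, List.map_nil, pvMinList, List.foldl_cons, List.foldl_nil,
    cortarA]

lemma pvInv_level (sandia : List (List Int)) (rects : List (Int × Int × Int × Int))
    (h : ∀ q ∈ rects, pvInvR sandia q) : ∀ q ∈ pvLevel rects, pvInvR sandia q := by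
  intro q hq
  rw [pvLevel_eq_flatMap, List.mem_flatMap] at hq
  obtain ⟨r, hr, hqr⟩ := hq
  exact pvInv_step sandia r q (h r hr) hqr

-- main induction on the number of cuts
lemma pvMain (sandia : List (List Int)) (n : Nat) :
    ∀ rects : List (Int × Int × Int × Int), (∀ q ∈ rects, pvInvR sandia q) →
      pvMinList ((pvIter n rects).map (pvLeaf (sandia.map pvRowPref)))
        = pvMinList (rects.map (fun q => cortarA sandia n q.1 q.2.1 q.2.2.1 q.2.2.2)) := by
  induction n with
  | zero =>
      intro rects h
      simp only [pvIter]
      congr 1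
      refine List.map_congr_left (fun q hq => ?_)
      obtain ⟨x0, x1, y0, y1⟩ := q
      exact pvBase sandia x0 x1 y0 y1 (h _ hq)
  | succ n ih =>
      intro rects h
      simp only [pvIter]
      rw [ih (pvLevel rects) (pvInv_level sandia rects h), pvLevel_eq_flatMap, pvMin_flatMap]
      exact congrArg pvMinList (List.map_congr_left (fun q _ => pvMin_expand sandia n q))

lemma pvPre_inv (sandia : List (List Int)) (x0 x1 y0 y1 : Int)
    (h : x1 ≤ x0 ∨ y1 ≤ y0 ∨
      (0 ≤ x0 ∧ x1 ≤ (sandia.length : Int) ∧ 0 ≤ y0 ∧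
        ∀ r ∈ (sandia.drop x0.toNat).take (x1 - x0).toNat, y1 ≤ (r.length : Int))) :
    pvInv sandia x0 x1 y0 y1 := by
  rcases h with h | h | ⟨hx0, hx1, hy0, hrows⟩
  · exact Or.inl h
  · exact Or.inr (Or.inl h)
  · refine Or.inr (Or.inr ⟨hx0, hx1, hy0, fun i hi0 hi1 => ?_⟩)
    have hilt : i.toNat < sandia.length := by omega
    have hrow : PySem.List.pyGetD sandia i [] = sandia[i.toNat]'hilt :=
      PySem.List.pyGetD_eq_getElem _ _ (by omega) (by omega)
    have hk : i.toNat - x0.toNat < ((sandia.drop x0.toNat).take (x1 - x0).toNat).length := by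
      simp only [List.length_take, List.length_drop]
      omega
    have heq : ((sandia.drop x0.toNat).take (x1 - x0).toNat)[i.toNat - x0.toNat]'hk
        = sandia[i.toNat]'hilt := by
      rw [List.getElem_take, List.getElem_drop]
      congr 1
      omega
    rw [hrow, ← heq]
    exact hrows _ (List.getElem_mem hk)

-- ===== VERDICT (by name: the statements are the Claim_ definitions above) =====
theorem cortar_spec : Claim_equal_cortar := by
  intro sandia c x0 x1 y0 y1 _ hpre
  unfold Spec_cortar cortar cortar_alt
  rw [pvRowpref_list,
      pvMain sandia c.toNat [(x0, x1, y0, y1)]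
        (by intro q hq; simp only [List.mem_singleton] at hq; subst hq
            exact pvPre_inv sandia x0 x1 y0 y1 hpre.2)]
  simp [pvMinList]
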